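-- pv_equiv track=rewrite | github.com/chiosso/AdventOfCode_2023_Python | Day12/hot_springs.py | doesSpringCombinationWork
-- ===== SOURCE A (Python) =====
-- def doesSpringCombinationWork(springs, groups):
--     groups_counted = 0
--     spring_groups = springs.split('.')
--     for spring_group in spring_groups:
--         if spring_group != '':
--             if len(spring_group) != groups[groups_counted]:
--                 return False
--             groups_counted = groups_counted + 1
--     return True
-- ===== SOURCE B (Python) =====
-- def doesSpringCombinationWork(springs, groups):
--     idx = 0
--     run = 0
--     for ch in springs + '.':
--         if ch == '.':
--             if run != 0:
--                 if idx >= len(groups) or run != groups[idx]: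
--                     return False
--                 idx += 1
--                 run = 0
--         else:
--             run += 1
--     return True
-- ===== Notes on version B (the rewrite author's own statement) =====
-- stated objective: alternative
-- what changed: B replaces split('.') plus an indexed loop over substrings by a single character-by-character state machine keeping a current run length and a group index, never materialising the substring list.
import Mathlib
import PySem

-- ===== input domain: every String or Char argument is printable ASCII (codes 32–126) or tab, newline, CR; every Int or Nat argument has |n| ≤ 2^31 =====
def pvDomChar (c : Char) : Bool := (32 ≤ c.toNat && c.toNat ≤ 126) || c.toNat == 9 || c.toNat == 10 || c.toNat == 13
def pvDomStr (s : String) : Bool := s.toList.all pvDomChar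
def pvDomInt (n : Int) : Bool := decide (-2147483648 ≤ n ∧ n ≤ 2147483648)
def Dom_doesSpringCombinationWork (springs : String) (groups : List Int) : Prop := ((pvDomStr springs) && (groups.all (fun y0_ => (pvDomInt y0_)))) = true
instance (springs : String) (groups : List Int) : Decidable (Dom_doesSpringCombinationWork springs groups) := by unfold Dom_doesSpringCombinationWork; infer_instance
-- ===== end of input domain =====

-- B replaces A's split('.')-then-loop by a one-pass per-character run-length state machine; same cost, no substring list.

-- ===== PORT A =====
-- A's for-loop over springs.split('.') with the groups_counted index; the string side is
-- carried as List Char (PySem's Chars.splitOn is exactly str.split with a non-empty separator).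
-- Where Python A raises IndexError (groups[groups_counted] out of range) the port returns false;
-- those inputs are excluded by Pre_.
def aLoop (groups : List Int) : List (List Char) → Int → Bool
  | [], _ => true
  | sg :: rest, cnt =>
    if sg ≠ [] then
      match PySem.List.pyGet? groups cnt with
      | none => false   -- Python: IndexError, excluded by Pre_
      | some g => if (sg.length : Int) ≠ g then false else aLoop groups rest (cnt + 1)
    else aLoop groups rest cnt

def doesSpringCombinationWork (springs : String) (groups : List Int) : Bool :=
  aLoop groups (PySem.Chars.splitOn springs.toList ['.']) 0

-- ===== PORT B =====
-- B's state machine: for ch in springs + '.', keeping the group index and the current run length.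
def bLoop (groups : List Int) : List Char → Int → Int → Bool
  | [], _, _ => true
  | c :: rest, idx, run =>
    if c = '.' then
      if run ≠ 0 then
        if decide (idx ≥ (groups.length : Int)) || decide (run ≠ (PySem.List.pyGet? groups idx).getD 0) then
          false
        else bLoop groups rest (idx + 1) 0
      else bLoop groups rest idx run
    else bLoop groups rest idx (run + 1)

def doesSpringCombinationWork_alt (springs : String) (groups : List Int) : Bool :=
  bLoop groups (springs.toList ++ ['.']) 0 0

-- ===== PRECONDITION & SPEC =====
-- lengths of the non-empty '.'-separated runs of springs, as A's split sees them
def pvRunLens (springs : String) : List Int :=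
  ((PySem.Chars.splitOn springs.toList ['.']).filter (· ≠ [])).map (fun g => (g.length : Int))

-- Pre_ excludes exactly the inputs on which Python A raises IndexError: the string has more
-- non-empty '.'-separated runs than groups has entries while the first groups.length runs all match groups.
def Pre_doesSpringCombinationWork (springs : String) (groups : List Int) : Prop :=
  ¬ ((groups.length : Nat) < (pvRunLens springs).length ∧ (pvRunLens springs).take groups.length = groups)
instance (springs : String) (groups : List Int) : Decidable (Pre_doesSpringCombinationWork springs groups) := by
  unfold Pre_doesSpringCombinationWork; infer_instance

def pvWitness_doesSpringCombinationWork : String × List Int := ("#.##.#", [1, 2, 1])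

def Spec_doesSpringCombinationWork (springs : String) (groups : List Int) (out : Bool) : Prop := out = doesSpringCombinationWork_alt springs groups
instance (springs : String) (groups : List Int) (out : Bool) : Decidable (Spec_doesSpringCombinationWork springs groups out) := by unfold Spec_doesSpringCombinationWork; infer_instance

-- ===== CLAIM (what is proved, stated in full; the proofs are below) =====
def Claim_equal_doesSpringCombinationWork : Prop := ∀ (springs : String) (groups : List Int), Dom_doesSpringCombinationWork springs groups → Pre_doesSpringCombinationWork springs groups → Spec_doesSpringCombinationWork springs groups (doesSpringCombinationWork springs groups)

-- ===== LEMMAS AND PROOFS =====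

-- reference splitter: split on '.' (str.split('.') for a one-character separator)
def mySplit : List Char → List (List Char)
  | [] => [[]]
  | c :: rest =>
    if c = '.' then [] :: mySplit rest
    else
      match mySplit rest with
      | [] => [[c]]
      | h :: t => (c :: h) :: t

-- lengths of the maximal non-'.' runs of l, with r the length of the run currently open
def runsOf : List Char → Nat → List Nat
  | [], r => if r ≠ 0 then [r] else []
  | c :: rest, r =>
    if c = '.' then (if r ≠ 0 then r :: runsOf rest 0 else runsOf rest 0)
    else runsOf rest (r + 1)

-- compare run lengths against the remaining groups (false covers both A's IndexError point and B's bound check)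
def cRuns : List Int → List Nat → Bool
  | _, [] => true
  | [], _ :: _ => false
  | g :: gs, r :: rs => if (r : Int) ≠ g then false else cRuns gs rs

def segLens (segs : List (List Char)) : List Nat := (segs.filter (· ≠ [])).map List.length

theorem cRuns_nil (gs : List Int) : cRuns gs [] = true := by cases gs <;> rfl
theorem cRuns_nil_cons (r : Nat) (rs : List Nat) : cRuns [] (r :: rs) = false := rfl
theorem cRuns_cons_cons (g : Int) (gs : List Int) (r : Nat) (rs : List Nat) :
    cRuns (g :: gs) (r :: rs) = if (r : Int) ≠ g then false else cRuns gs rs := rfl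
theorem runsOf_cons (c : Char) (rest : List Char) (r : Nat) :
    runsOf (c :: rest) r =
      if c = '.' then (if r ≠ 0 then r :: runsOf rest 0 else runsOf rest 0)
      else runsOf rest (r + 1) := rfl

theorem aLoop_cons (groups : List Int) (sg : List Char) (rest : List (List Char)) (cnt : Int) :
    aLoop groups (sg :: rest) cnt =
      if sg ≠ [] then
        (match PySem.List.pyGet? groups cnt with
         | none => false
         | some g => if (sg.length : Int) ≠ g then false else aLoop groups rest (cnt + 1))
      else aLoop groups rest cnt := rfl

theorem bLoop_cons (groups : List Int) (c : Char) (rest : List Char) (idx run : Int) :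
    bLoop groups (c :: rest) idx run =
      if c = '.' then
        if run ≠ 0 then
          if decide (idx ≥ (groups.length : Int)) || decide (run ≠ (PySem.List.pyGet? groups idx).getD 0) then
            false
          else bLoop groups rest (idx + 1) 0
        else bLoop groups rest idx run
      else bLoop groups rest idx (run + 1) := rfl

theorem modifyHead_id_eq {α : Type} (l : List α) : List.modifyHead (fun x => x) l = l := by
  cases l <;> simp

theorem segLens_cons (x : List Char) (xs : List (List Char)) :
    segLens (x :: xs) = (if x ≠ [] then [x.length] else []) ++ segLens xs := by
  by_cases hx : x = [] <;> simp [segLens, hx]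

theorem aLoop_cons_some (groups : List Int) (sg : List Char) (rest : List (List Char))
    (cnt : Int) (g : Int) (hsg : sg ≠ []) (hget : PySem.List.pyGet? groups cnt = some g) :
    aLoop groups (sg :: rest) cnt =
      if (sg.length : Int) ≠ g then false else aLoop groups rest (cnt + 1) := by
  rw [aLoop_cons, if_pos hsg, hget]

theorem aLoop_cons_none (groups : List Int) (sg : List Char) (rest : List (List Char))
    (cnt : Int) (hsg : sg ≠ []) (hget : PySem.List.pyGet? groups cnt = none) :
    aLoop groups (sg :: rest) cnt = false := by
  rw [aLoop_cons, if_pos hsg, hget]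

theorem mySplit_ne_nil (l : List Char) : mySplit l ≠ [] := by
  cases l with
  | nil => simp [mySplit]
  | cons c rest =>
    simp only [mySplit]
    split_ifs
    · simp
    · cases h : mySplit rest <;> simp

theorem go_spec (fuel : Nat) (l cur : List Char) (acc : List (List Char))
    (h : l.length < fuel) :
    PySem.Chars.splitOn.go ['.'] fuel l cur acc
      = acc.reverse ++ (mySplit l).modifyHead (cur.reverse ++ ·) := by
  induction fuel generalizing l cur acc with
  | zero => omega
  | succ f ih =>
    cases l with
    | nil => simp [PySem.Chars.splitOn.go, mySplit]
    | cons c rest =>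
      by_cases hc : c = '.'
      · subst hc
        have hpre : List.isPrefixOf ['.'] ('.' :: rest) = true := by simp [List.isPrefixOf]
        rw [show PySem.Chars.splitOn.go ['.'] (f+1) ('.' :: rest) cur acc
              = PySem.Chars.splitOn.go ['.'] f rest [] (cur.reverse :: acc) by
            simp [PySem.Chars.splitOn.go, hpre]]
        rw [ih rest [] (cur.reverse :: acc) (by simpa using Nat.lt_of_succ_lt_succ h)]
        simp [mySplit, modifyHead_id_eq]
      · have hpre : List.isPrefixOf ['.'] (c :: rest) = false := by
          simp [List.isPrefixOf]; exact fun h' => (hc h'.symm).elim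
        rw [show PySem.Chars.splitOn.go ['.'] (f+1) (c :: rest) cur acc
              = PySem.Chars.splitOn.go ['.'] f rest (c :: cur) acc by
            simp [PySem.Chars.splitOn.go, hpre]]
        rw [ih rest (c :: cur) acc (by simpa using Nat.lt_of_succ_lt_succ h)]
        obtain ⟨hh, t, hsplit⟩ : ∃ hh t, mySplit rest = hh :: t := by
          cases hs : mySplit rest with
          | nil => exact absurd hs (mySplit_ne_nil rest)
          | cons a b => exact ⟨a, b, rfl⟩
        simp [mySplit, hc, hsplit]

theorem splitOn_eq_mySplit (l : List Char) :
    PySem.Chars.splitOn l ['.'] = mySplit l := by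
  have := go_spec (l.length + 1) l [] [] (Nat.lt_succ_self _)
  rw [PySem.Chars.splitOn] at *
  simpa [modifyHead_id_eq] using this

theorem aLoop_eq_cRuns (groups : List Int) (segs : List (List Char)) (n : Nat) :
    aLoop groups segs (n : Int) = cRuns (groups.drop n) (segLens segs) := by
  induction segs generalizing n with
  | nil => simp [aLoop, segLens, cRuns]
  | cons sg rest ih =>
    by_cases hsg : sg = []
    · subst hsg
      rw [aLoop_cons, if_neg (by simp), segLens_cons]
      simpa using ih n
    · rw [segLens_cons, if_pos hsg]
      rcases Nat.lt_or_ge n groups.length with hn | hn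
      · have hget : PySem.List.pyGet? groups (n : Int) = some groups[n] := by
          simp [List.getElem?_eq_getElem hn]
        have hdrop : groups.drop n = groups[n] :: groups.drop (n + 1) :=
          List.drop_eq_getElem_cons hn
        rw [aLoop_cons_some groups sg rest _ _ hsg hget, hdrop, List.singleton_append,
          cRuns_cons_cons]
        by_cases hlen : (sg.length : Int) = groups[n]
        · have hcast : ((n : Int) + 1) = ((n + 1 : Nat) : Int) := by push_cast; ring
          rw [if_neg (by simp [hlen]), if_neg (by simp [hlen]), hcast, ih (n + 1)]
        · rw [if_pos hlen, if_pos hlen]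
      · have hget : PySem.List.pyGet? groups (n : Int) = none := by
          simp [List.getElem?_eq_none hn]
        have hdrop : groups.drop n = [] := List.drop_eq_nil_of_le hn
        rw [aLoop_cons_none groups sg rest _ hsg hget, hdrop, List.singleton_append,
          cRuns_nil_cons]

theorem runsOf_mySplit (l : List Char) (r : Nat) (h : List Char) (t : List (List Char))
    (hs : mySplit l = h :: t) :
    runsOf l r = (if r + h.length ≠ 0 then [r + h.length] else []) ++ segLens t := by
  induction l generalizing r h t with
  | nil =>
    simp only [mySplit] at hs
    injection hs with h1 h2
    subst h1; subst h2
    by_cases hr : r = 0 <;> simp [runsOf, segLens, hr]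
  | cons c rest ih =>
    obtain ⟨hh, tt, hrest⟩ : ∃ hh tt, mySplit rest = hh :: tt := by
      cases hx : mySplit rest with
      | nil => exact absurd hx (mySplit_ne_nil rest)
      | cons a b => exact ⟨a, b, rfl⟩
    by_cases hc : c = '.'
    · subst hc
      rw [show mySplit ('.' :: rest) = [] :: mySplit rest from by simp [mySplit]] at hs
      injection hs with h1 h2
      subst h1
      rw [← h2, runsOf_cons, if_pos rfl, ih 0 hh tt hrest, hrest, segLens_cons]
      by_cases hhh : hh = []
      · subst hhh
        by_cases hr : r = 0 <;> simp [hr]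
      · have hlen0 : hh.length ≠ 0 := by simpa [List.length_eq_zero_iff] using hhh
        by_cases hr : r = 0 <;> simp [hr, hlen0, hhh]
    · rw [show mySplit (c :: rest) = (c :: hh) :: tt from by simp [mySplit, hc, hrest]] at hs
      injection hs with h1 h2
      subst h2
      rw [show runsOf (c :: rest) r = runsOf rest (r + 1) from by simp [runsOf, hc]]
      rw [ih (r + 1) hh tt hrest, ← h1]
      have heq : r + 1 + hh.length = r + (c :: hh).length := by simp; omega
      have h2' : r + 1 + hh.length ≠ 0 := by omega
      rw [if_pos h2', if_pos (heq ▸ h2'), heq]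

theorem runsOf_zero_eq (l : List Char) : runsOf l 0 = segLens (mySplit l) := by
  obtain ⟨h, t, hs⟩ : ∃ h t, mySplit l = h :: t := by
    cases hx : mySplit l with
    | nil => exact absurd hx (mySplit_ne_nil l)
    | cons a b => exact ⟨a, b, rfl⟩
  rw [runsOf_mySplit l 0 h t hs, hs, segLens_cons]
  by_cases hh : h = []
  · simp [hh]
  · simp [hh]

theorem bLoop_eq_cRuns (groups : List Int) (l : List Char) (n r : Nat) :
    bLoop groups (l ++ ['.']) (n : Int) (r : Int) = cRuns (groups.drop n) (runsOf l r) := by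
  induction l generalizing n r with
  | nil =>
    rw [List.nil_append, bLoop_cons, if_pos rfl]
    by_cases hr : r = 0
    · subst hr
      simp [bLoop, runsOf, cRuns]
    · rw [if_pos (by exact_mod_cast hr)]
      rcases Nat.lt_or_ge n groups.length with hn | hn
      · have hge : decide ((n : Int) ≥ (groups.length : Int)) = false := by
          simp; exact_mod_cast hn
        have hget : (PySem.List.pyGet? groups (n : Int)).getD 0 = groups[n] := by
          simp [List.getElem?_eq_getElem hn]
        have hdrop : groups.drop n = groups[n] :: groups.drop (n + 1) :=
          List.drop_eq_getElem_cons hn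
        rw [hge, hget, hdrop, show runsOf [] r = [r] from by simp [runsOf, hr], cRuns_cons_cons]
        by_cases hv : (r : Int) = groups[n]
        · rw [if_neg (by simp [hv]), if_neg (by simp [hv])]
          rw [show bLoop groups [] ((n : Int) + 1) 0 = true from rfl, cRuns_nil]
        · rw [if_pos (by simp [hv]), if_pos hv]
      · have hge : decide ((n : Int) ≥ (groups.length : Int)) = true := by
          simp; exact_mod_cast hn
        have hdrop : groups.drop n = [] := List.drop_eq_nil_of_le hn
        rw [hge, hdrop, show runsOf [] r = [r] from by simp [runsOf, hr], cRuns_nil_cons]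
        simp
  | cons c rest ih =>
    rw [List.cons_append, bLoop_cons]
    by_cases hc : c = '.'
    · rw [if_pos hc]
      by_cases hr : r = 0
      · subst hr
        rw [if_neg (by simp)]
        simpa [runsOf, hc] using ih n 0
      · rw [if_pos (by exact_mod_cast hr)]
        rcases Nat.lt_or_ge n groups.length with hn | hn
        · have hge : decide ((n : Int) ≥ (groups.length : Int)) = false := by
            simp; exact_mod_cast hn
          have hget : (PySem.List.pyGet? groups (n : Int)).getD 0 = groups[n] := by
            simp [List.getElem?_eq_getElem hn]
          have hdrop : groups.drop n = groups[n] :: groups.drop (n + 1) :=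
            List.drop_eq_getElem_cons hn
          rw [hge, hget, hdrop, runsOf_cons, if_pos hc, if_pos hr, cRuns_cons_cons]
          by_cases hv : (r : Int) = groups[n]
          · have hcast : ((n : Int) + 1) = ((n + 1 : Nat) : Int) := by push_cast; ring
            have h0 : (0 : Int) = ((0 : Nat) : Int) := by norm_num
            rw [if_neg (by simp [hv]), if_neg (by simp [hv]), hcast, h0, ih (n + 1) 0]
          · rw [if_pos (by simp [hv]), if_pos hv]
        · have hge : decide ((n : Int) ≥ (groups.length : Int)) = true := by
            simp; exact_mod_cast hn
          have hdrop : groups.drop n = [] := List.drop_eq_nil_of_le hn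
          rw [hge, hdrop, runsOf_cons, if_pos hc, if_pos hr, cRuns_nil_cons]
          simp
    · rw [if_neg hc]
      have hcast : ((r : Int) + 1) = ((r + 1 : Nat) : Int) := by push_cast; ring
      rw [hcast, ih n (r + 1)]
      simp [runsOf, hc]

theorem ports_agree (springs : String) (groups : List Int) :
    doesSpringCombinationWork springs groups = doesSpringCombinationWork_alt springs groups := by
  unfold doesSpringCombinationWork doesSpringCombinationWork_alt
  rw [splitOn_eq_mySplit]
  have hA := aLoop_eq_cRuns groups (mySplit springs.toList) 0
  have hB := bLoop_eq_cRuns groups springs.toList 0 0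
  simp only [Nat.cast_zero] at hA hB
  rw [hA, hB, runsOf_zero_eq]

-- ===== VERDICT (by name: the statement is the Claim_ definition above) =====
theorem doesSpringCombinationWork_spec : Claim_equal_doesSpringCombinationWork := by
  intro springs groups _ _
  exact ports_agree springs groups
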